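-- pv_equiv track=rewrite | github.com/swanhtet01/swanhtet01.github.io | translation_agent.py | _select_best_translation
-- ===== SOURCE A (Python) =====
-- from typing import Dict, List, Optional, Tuple
--
-- def _select_best_translation(translations: Dict, original_text: str, content_type: str) -> str:
--     """Select the best translation from available options"""
--
--     if not translations:
--         return original_text
--
--     if len(translations) == 1:
--         return list(translations.values())[0]
--
--     # Priority order based on quality and context awareness
--     priority_order = ['openai', 'deepl', 'google_free']
--
--     for provider in priority_order:
--         if provider in translations:
--             return translations[provider]
--
--     # Fallback to first available
--     return list(translations.values())[0]
-- ===== SOURCE B (Python) =====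
-- def _select_best_translation(translations, original_text: str, content_type: str) -> str:
--     """Select the best translation by provider rank in a single pass (argmin accumulator)."""
--     if not translations:
--         return original_text
--     rank = {'openai': 0, 'deepl': 1, 'google_free': 2}
--     best = None  # (rank, value); first-seen wins on ties
--     for provider, value in translations.items():
--         r = rank.get(provider, 3)
--         if best is None or r < best[0]:
--             best = (r, value)
--     return best[1]
-- ===== Notes on version B (the rewrite author's own statement) =====
-- stated objective: alternative
-- what changed: Replaced the fixed-priority-list scan with repeated membership lookups (plus a separate singleton shortcut and fallback) by a single argmin pass over the items using a rank table with a sentinel rank for unknown providers, first-seen winning ties.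
import Mathlib
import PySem

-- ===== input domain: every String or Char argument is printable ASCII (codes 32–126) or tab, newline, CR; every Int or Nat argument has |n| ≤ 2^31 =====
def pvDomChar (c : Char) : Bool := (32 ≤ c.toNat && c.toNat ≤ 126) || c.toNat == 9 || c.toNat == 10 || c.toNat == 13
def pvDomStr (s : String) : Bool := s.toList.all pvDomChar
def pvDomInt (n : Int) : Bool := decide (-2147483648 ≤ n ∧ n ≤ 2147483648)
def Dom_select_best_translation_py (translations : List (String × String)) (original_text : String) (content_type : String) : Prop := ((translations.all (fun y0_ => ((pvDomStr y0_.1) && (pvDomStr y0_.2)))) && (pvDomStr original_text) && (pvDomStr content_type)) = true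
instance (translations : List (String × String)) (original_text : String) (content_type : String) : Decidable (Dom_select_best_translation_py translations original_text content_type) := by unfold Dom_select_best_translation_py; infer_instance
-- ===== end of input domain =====

-- B replaces A's fixed-priority scan with a single rank-argmin pass; alternative decomposition, same behaviour.
-- ===== PORT A =====
def pvA_prio : List String → List (String × String) → Option String
  | [], _ => none
  | p :: ps, ts =>
      match (PySem.Dict.mk ts).get? p with      -- 'if provider in translations: return translations[provider]'
      | some v => some v
      | none => pvA_prio ps ts

def select_best_translation_py (translations : List (String × String)) (original_text : String) (content_type : String) : String :=
  if translations.isEmpty then original_text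
  else if translations.length = 1 then ((PySem.List.pyGet? (translations.map Prod.snd) 0).getD "")
  else
    match pvA_prio ["openai", "deepl", "google_free"] translations with
    | some v => v
    | none => ((PySem.List.pyGet? (translations.map Prod.snd) 0).getD "")

-- ===== PORT B =====
def pvRank (p : String) : Nat :=
  if p = "openai" then 0 else if p = "deepl" then 1 else if p = "google_free" then 2 else 3

def pvStep (acc : Option (Nat × String)) (kv : String × String) : Option (Nat × String) :=
  match acc with
  | none => some (pvRank kv.1, kv.2)
  | some (br, bv) => if pvRank kv.1 < br then some (pvRank kv.1, kv.2) else some (br, bv)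

def select_best_translation_py_alt (translations : List (String × String)) (original_text : String) (content_type : String) : String :=
  if translations.isEmpty then original_text
  else
    match translations.foldl pvStep none with
    | some (_, v) => v
    | none => original_text    -- unreachable: fold over a nonempty list is some

-- ===== PRECONDITION & SPEC =====
def Spec_select_best_translation_py (translations : List (String × String)) (original_text : String) (content_type : String) (out : String) : Prop := out = select_best_translation_py_alt translations original_text content_type
instance (translations : List (String × String)) (original_text : String) (content_type : String) (out : String) : Decidable (Spec_select_best_translation_py translations original_text content_type out) := by unfold Spec_select_best_translation_py; infer_instance

-- ===== CLAIM (what is proved, stated in full; the proofs are below) =====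
def Claim_equal_select_best_translation_py : Prop := ∀ (translations : List (String × String)) (original_text : String) (content_type : String), Dom_select_best_translation_py translations original_text content_type → Spec_select_best_translation_py translations original_text content_type (select_best_translation_py translations original_text content_type)

-- ===== LEMMAS AND PROOFS =====

-- total version of B's fold once the accumulator is set
def pvG : List (String × String) → Nat × String → Nat × String
  | [], a => a
  | kv :: xs, (r, v) =>
      if pvRank kv.1 < r then pvG xs (pvRank kv.1, kv.2) else pvG xs (r, v)

lemma foldl_pvStep_some (xs : List (String × String)) (r : Nat) (v : String) :
    xs.foldl pvStep (some (r, v)) = some (pvG xs (r, v)) := by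
  induction xs generalizing r v with
  | nil => rfl
  | cons kv xs ih =>
      simp only [List.foldl_cons, pvStep, pvG]
      split <;> exact ih _ _

lemma pvG_noBetter (xs : List (String × String)) (r : Nat) (v : String)
    (h : ∀ kv ∈ xs, ¬ pvRank kv.1 < r) : pvG xs (r, v) = (r, v) := by
  induction xs with
  | nil => rfl
  | cons kv xs ih =>
      simp only [pvG]
      rw [if_neg (h kv List.mem_cons_self)]
      exact ih (fun z hz => h z (List.mem_cons_of_mem _ hz))

lemma pvRank_pos (p : String) (h : p ≠ "openai") : 0 < pvRank p := by
  unfold pvRank; split_ifs <;> simp_all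

lemma pvRank_ge_two (p : String) (h0 : p ≠ "openai") (h1 : p ≠ "deepl") : 2 ≤ pvRank p := by
  unfold pvRank; split_ifs <;> simp_all

lemma pvRank_ge_three (p : String) (h0 : p ≠ "openai") (h1 : p ≠ "deepl")
    (h2 : p ≠ "google_free") : 3 ≤ pvRank p := by
  unfold pvRank; split_ifs <;> simp_all

lemma pvRank_le_three (p : String) : pvRank p ≤ 3 := by
  unfold pvRank; split_ifs <;> omega

lemma pvG_found (xs : List (String × String)) (r : Nat) (v : String) (p w : String)
    (hr : pvRank p < r) (hget : (PySem.Dict.mk xs).get? p = some w)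
    (hmin : ∀ kv ∈ xs, kv.1 ≠ p → pvRank p < pvRank kv.1) :
    pvG xs (r, v) = (pvRank p, w) := by
  induction xs generalizing r v with
  | nil => simp [PySem.Dict.get?] at hget
  | cons kv xs ih =>
      rw [PySem.Dict.get?_mk_cons] at hget
      by_cases hk : kv.1 = p
      · rw [if_pos (by simpa using hk)] at hget
        have hw : w = kv.2 := by simpa using hget.symm
        subst hw
        simp only [pvG, hk, if_pos hr]
        exact pvG_noBetter _ _ _ (fun z hz hlt => by
          by_cases hz1 : z.1 = p
          · rw [hz1] at hlt; omega
          · exact absurd hlt (Nat.lt_asymm (hmin z (List.mem_cons_of_mem _ hz) hz1)))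
      · rw [if_neg (by simpa using hk)] at hget
        have hkr : pvRank p < pvRank kv.1 := hmin kv List.mem_cons_self hk
        simp only [pvG]
        split
        · exact ih _ _ hkr hget (fun z hz => hmin z (List.mem_cons_of_mem _ hz))
        · exact ih _ _ hr hget (fun z hz => hmin z (List.mem_cons_of_mem _ hz))

lemma get?_none_forall (xs : List (String × String)) (p : String)
    (h : (PySem.Dict.mk xs).get? p = none) : ∀ kv ∈ xs, kv.1 ≠ p := by
  induction xs with
  | nil => simp
  | cons kv xs ih =>
      rw [PySem.Dict.get?_mk_cons] at h
      by_cases hk : (kv.1 == p) = true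
      · rw [if_pos hk] at h; exact absurd h (by simp)
      · rw [if_neg hk] at h
        intro z hz
        rcases List.mem_cons.1 hz with rfl | hz
        · simpa using hk
        · exact ih h z hz

-- ===== VERDICT (by name: the statement is the Claim_ definition above) =====
theorem select_best_translation_py_spec : Claim_equal_select_best_translation_py := by
  intro ts orig ct _
  unfold Spec_select_best_translation_py select_best_translation_py select_best_translation_py_alt
  cases ts with
  | nil => rfl
  | cons x xs =>
      simp only [List.isEmpty_cons, List.foldl_cons, if_false, Bool.false_eq_true]
      have hstep : pvStep none x = some (pvRank x.1, x.2) := rfl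
      rw [hstep, foldl_pvStep_some]
      by_cases hlen : (x :: xs).length = 1
      · -- singleton
        have hx : xs = [] := by cases xs <;> simp_all
        subst hx
        simp [pvG, PySem.List.pyGet?, PySem.List.pyIdx?]
      · rw [if_neg hlen]
        simp only [pvA_prio]
        cases h0 : (PySem.Dict.mk (x :: xs)).get? "openai" with
        | some v =>
            rw [PySem.Dict.get?_mk_cons] at h0
            by_cases hk : x.1 = "openai"
            · rw [if_pos (by simpa using hk)] at h0
              have hv : v = x.2 := by simpa using h0.symm
              subst hv
              have hr0 : pvRank x.1 = 0 := by rw [hk]; rfl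
              rw [hr0, pvG_noBetter _ _ _ (fun z _ => Nat.not_lt_zero _)]
            · rw [if_neg (by simpa using hk)] at h0
              rw [pvG_found xs (pvRank x.1) x.2 "openai" v (pvRank_pos x.1 hk) h0
                    (fun z _ hzp => pvRank_pos z.1 hzp)]
        | none =>
            have hall0 : ∀ kv ∈ (x :: xs), kv.1 ≠ "openai" := get?_none_forall _ _ h0
            cases h1 : (PySem.Dict.mk (x :: xs)).get? "deepl" with
            | some v =>
                rw [PySem.Dict.get?_mk_cons] at h1
                by_cases hk : x.1 = "deepl"
                · rw [if_pos (by simpa using hk)] at h1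
                  have hv : v = x.2 := by simpa using h1.symm
                  subst hv
                  have hr1 : pvRank x.1 = 1 := by rw [hk]; rfl
                  rw [hr1, pvG_noBetter _ _ _ (fun z hz hlt => by
                    have := pvRank_pos z.1 (hall0 z (List.mem_cons_of_mem _ hz)); omega)]
                · rw [if_neg (by simpa using hk)] at h1
                  rw [pvG_found xs (pvRank x.1) x.2 "deepl" v
                        (pvRank_ge_two x.1 (hall0 x List.mem_cons_self) hk) h1
                        (fun z hz hzp =>
                          pvRank_ge_two z.1 (hall0 z (List.mem_cons_of_mem _ hz)) hzp)]
            | none =>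
                have hall1 : ∀ kv ∈ (x :: xs), kv.1 ≠ "deepl" := get?_none_forall _ _ h1
                cases h2 : (PySem.Dict.mk (x :: xs)).get? "google_free" with
                | some v =>
                    rw [PySem.Dict.get?_mk_cons] at h2
                    by_cases hk : x.1 = "google_free"
                    · rw [if_pos (by simpa using hk)] at h2
                      have hv : v = x.2 := by simpa using h2.symm
                      subst hv
                      have hr2 : pvRank x.1 = 2 := by rw [hk]; rfl
                      rw [hr2, pvG_noBetter _ _ _ (fun z hz hlt => by
                        have := pvRank_ge_two z.1 (hall0 z (List.mem_cons_of_mem _ hz))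
                          (hall1 z (List.mem_cons_of_mem _ hz)); omega)]
                    · rw [if_neg (by simpa using hk)] at h2
                      rw [pvG_found xs (pvRank x.1) x.2 "google_free" v
                            (by have := pvRank_ge_three x.1 (hall0 x List.mem_cons_self)
                                  (hall1 x List.mem_cons_self) hk
                                have : pvRank "google_free" = 2 := rfl
                                omega) h2
                            (fun z hz hzp => by
                              have := pvRank_ge_three z.1 (hall0 z (List.mem_cons_of_mem _ hz))
                                (hall1 z (List.mem_cons_of_mem _ hz)) hzp
                              have h2' : pvRank "google_free" = 2 := rfl
                              omega)]
                | none =>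
                    have hall2 : ∀ kv ∈ (x :: xs), kv.1 ≠ "google_free" :=
                      get?_none_forall _ _ h2
                    have hr3 : pvRank x.1 = 3 :=
                      Nat.le_antisymm (pvRank_le_three x.1)
                        (pvRank_ge_three x.1 (hall0 x List.mem_cons_self)
                          (hall1 x List.mem_cons_self) (hall2 x List.mem_cons_self))
                    rw [hr3, pvG_noBetter _ _ _ (fun z hz hlt => by
                      have := pvRank_ge_three z.1 (hall0 z (List.mem_cons_of_mem _ hz))
                        (hall1 z (List.mem_cons_of_mem _ hz)) (hall2 z (List.mem_cons_of_mem _ hz))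
                      omega)]
                    simp [PySem.List.pyGet?, PySem.List.pyIdx?]
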